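-- pv_equiv track=rewrite | github.com/rbusquet/puzzles | src/puzzles/capital_after_vowel.py | capital_after_vowel
-- ===== SOURCE A (Python) =====
-- import string
-- from typing import Iterator
--
-- def capital_after_vowel(text: str) -> str:
--     def iterator(word: str) -> Iterator[str]:
--         capitalize = False
--         for letter in word:
--             if letter in "aeiou":
--                 capitalize = True
--             elif capitalize and letter in string.ascii_letters:
--                 yield letter.capitalize()
--                 capitalize = False
--                 continue
--             yield letter
--
--     return "".join(iterator(text))
-- ===== SOURCE B (Python) =====
-- import re
--
-- _PAT = re.compile(r'([aeiou])([^A-Za-z]*)([b-df-hj-np-tv-zA-Z])')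
--
--
-- def capital_after_vowel(text: str) -> str:
--     return _PAT.sub(lambda m: m.group(1) + m.group(2) + m.group(3).upper(), text)
-- ===== Notes on version B (the rewrite author's own statement) =====
-- stated objective: idiomatic
-- what changed: Replaces the hand-written generator with a capitalize flag by a single re.sub with pattern ([aeiou])([^A-Za-z]*)([b-df-hj-np-tv-zA-Z]) uppercasing the third group.
import Mathlib
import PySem

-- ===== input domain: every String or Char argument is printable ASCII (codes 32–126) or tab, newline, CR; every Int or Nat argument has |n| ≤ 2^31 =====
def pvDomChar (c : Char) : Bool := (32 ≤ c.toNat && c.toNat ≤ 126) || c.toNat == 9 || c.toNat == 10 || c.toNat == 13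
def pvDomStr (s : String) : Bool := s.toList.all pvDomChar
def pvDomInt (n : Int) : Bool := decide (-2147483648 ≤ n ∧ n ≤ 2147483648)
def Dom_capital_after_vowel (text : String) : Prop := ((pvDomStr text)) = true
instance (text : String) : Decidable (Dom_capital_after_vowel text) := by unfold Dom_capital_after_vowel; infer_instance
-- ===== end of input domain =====

-- B replaces A's generator-with-flag scan by a single regex substitution (re.sub),
-- ported as a specialized left-to-right matcher; objective: idiomatic.

-- ===== PORT A =====
-- letter in "aeiou"
def pvIsVowel (c : Char) : Bool := c == 'a' || c == 'e' || c == 'i' || c == 'o' || c == 'u'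
-- letter in string.ascii_letters (exact: ascii_letters = a-z, A-Z)
def pvIsAsciiLetter (c : Char) : Bool := ('a' ≤ c && c ≤ 'z') || ('A' ≤ c && c ≤ 'Z')

-- the generator `iterator` with its `capitalize` flag; `.capitalize()` on a single
-- ASCII letter = Char.toUpper (exact on the ASCII letters the branch admits)
def pvIterA (cap : Bool) : List Char → List Char
  | [] => []
  | c :: rest =>
    if pvIsVowel c then c :: pvIterA true rest
    else if cap && pvIsAsciiLetter c then c.toUpper :: pvIterA false rest
    else c :: pvIterA cap rest

def capital_after_vowel (text : String) : String := String.ofList (pvIterA false text.toList)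

-- ===== PORT B =====
-- attempt to match `[^A-Za-z]*[b-df-hj-np-tv-zA-Z]` at the start of l:
-- greedily take non-letters, then the next char must be a letter that is
-- not a lowercase vowel; returns (group2, group3, remainder)
def pvTrySuffix (l : List Char) : Option (List Char × Char × List Char) :=
  match l.dropWhile (fun c => !pvIsAsciiLetter c) with
  | [] => none
  | h :: t => if pvIsVowel h then none else some (l.takeWhile (fun c => !pvIsAsciiLetter c), h, t)

theorem pvTrySuffix_len {l m t : List Char} {h : Char}
    (e : pvTrySuffix l = some (m, h, t)) : t.length < l.length := by
  unfold pvTrySuffix at e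
  have hlen := List.length_dropWhile_le (fun c => !pvIsAsciiLetter c) l
  rcases hd : l.dropWhile (fun c => !pvIsAsciiLetter c) with _ | ⟨x, xs⟩ <;> rw [hd] at e
  · simp at e
  · rw [hd] at hlen
    split at e
    · simp at e
    · rename_i xdead c2 rest2 heq
      injection heq with hx hxs
      subst hx; subst hxs
      split at e
      · simp at e
      · rw [Option.some_inj] at e
        have ht : t = xs := by
          have := congrArg (fun p : List Char × Char × List Char => p.2.2) e
          simpa using this.symm
        subst ht; simp at hlen; omega

-- re.sub of ([aeiou])([^A-Za-z]*)([b-df-hj-np-tv-zA-Z]): scan left to right; at a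
-- lowercase vowel try to complete a match and, on success, emit
-- group1 ++ group2 ++ upper(group3) and resume after the match
def pvSubB : List Char → List Char
  | [] => []
  | c :: rest =>
    if pvIsVowel c then
      match e : pvTrySuffix rest with
      | some (m, h, t) => c :: (m ++ h.toUpper :: pvSubB t)
      | none => c :: pvSubB rest
    else c :: pvSubB rest
  termination_by l => l.length
  decreasing_by
  · have := pvTrySuffix_len e; simp; omega
  · simp
  · simp

def capital_after_vowel_alt (text : String) : String := String.ofList (pvSubB text.toList)

-- ===== PRECONDITION & SPEC =====
def Spec_capital_after_vowel (text : String) (out : String) : Prop := out = capital_after_vowel_alt text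
instance (text : String) (out : String) : Decidable (Spec_capital_after_vowel text out) := by unfold Spec_capital_after_vowel; infer_instance

-- ===== CLAIM (what is proved, stated in full; the proofs are below) =====
def Claim_equal_capital_after_vowel : Prop := ∀ (text : String), Dom_capital_after_vowel text → Spec_capital_after_vowel text (capital_after_vowel text)

-- ===== LEMMAS AND PROOFS =====

-- a lowercase vowel is an ASCII letter
theorem pvVowel_letter {c : Char} (h : pvIsVowel c = true) : pvIsAsciiLetter c = true := by
  simp only [pvIsVowel, Bool.or_eq_true, beq_iff_eq] at h
  rcases h with ((((rfl | rfl) | rfl) | rfl) | rfl) <;> decide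

-- the main invariant: the flag machine with cap=false equals the regex scan, and
-- with cap=true it equals "finish the pending match, then scan"
theorem pvIter_eq_sub (l : List Char) :
    pvIterA false l = pvSubB l ∧
    pvIterA true l = (match pvTrySuffix l with
      | some (m, h, t) => m ++ h.toUpper :: pvSubB t
      | none => pvSubB l) := by
  induction l with
  | nil => constructor <;> simp [pvIterA, pvSubB, pvTrySuffix]
  | cons c rest ih =>
    obtain ⟨ih1, ih2⟩ := ih
    by_cases hv : pvIsVowel c = true
    · constructor
      · rw [pvIterA, pvSubB]
        simp only [hv, if_pos]
        rw [ih2]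
        cases e : pvTrySuffix rest <;> simp
      · rw [pvIterA]
        simp only [hv, if_pos]
        have hts : pvTrySuffix (c :: rest) = none := by
          unfold pvTrySuffix
          rw [List.dropWhile_cons]
          simp [pvVowel_letter hv, hv]
        rw [hts]
        rw [pvSubB]
        simp only [hv, if_pos]
        rw [ih2]
        cases e : pvTrySuffix rest <;> simp
    · by_cases hl : pvIsAsciiLetter c = true
      · constructor
        · rw [pvIterA, pvSubB]
          simp [hv, ih1]
        · rw [pvIterA]
          have hts : pvTrySuffix (c :: rest) = some ([], c, rest) := by
            unfold pvTrySuffix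
            rw [List.dropWhile_cons, List.takeWhile_cons]
            simp [hl, hv]
          rw [hts]
          simp [hv, hl, ih1]
      · have hts : pvTrySuffix (c :: rest) =
            (match pvTrySuffix rest with
              | some (m, h, t) => some (c :: m, h, t)
              | none => none) := by
          unfold pvTrySuffix
          rw [List.dropWhile_cons, List.takeWhile_cons]
          simp only [hl]
          cases hd : rest.dropWhile (fun c => !pvIsAsciiLetter c) with
          | nil => simp
          | cons x xs =>
            by_cases hvx : pvIsVowel x = true <;> simp [hvx]
        constructor
        · rw [pvIterA, pvSubB]
          simp [hv, hl, ih1]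
        · rw [pvIterA]
          simp only [hv, hl, Bool.and_false]
          rw [hts, ih2]
          cases e : pvTrySuffix rest with
          | none => simp [pvSubB, hv]
          | some x => rcases x with ⟨m, h, t⟩; simp

-- ===== VERDICT (by name: the statement is the Claim_ definition above) =====
theorem capital_after_vowel_spec : Claim_equal_capital_after_vowel := by
  intro text _
  unfold Spec_capital_after_vowel capital_after_vowel capital_after_vowel_alt
  rw [(pvIter_eq_sub text.toList).1]
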